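-- pv_equiv track=rewrite | github.com/Vacbo/oh-my-vacpi | scripts/session-stats/plot_read_summarizer.py | has_selector
-- ===== SOURCE A (Python) =====
-- def has_selector(path: str) -> bool:
--     """True iff `path` carries a read selector (`:50-200`, `:raw`, ...)."""
--     if not path:
--         return False
--     tail = path.rsplit("/", 1)[-1]
--     idx = tail.rfind(":")
--     if idx < 0:
--         return False
--     suffix = tail[idx + 1 :]
--     if not suffix:
--         return False
--     if suffix in ("raw", "conflicts"):
--         return True
--     return any(ch.isdigit() for ch in suffix)
-- ===== SOURCE B (Python) =====
-- def has_selector(path: str) -> bool: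
--     """True iff `path` carries a read selector (`:50-200`, `:raw`, ...)."""
--     # single reverse scan: stop at the first slash or colon seen from the end
--     rev = []
--     has_digit = False
--     for ch in reversed(path):
--         if ch == '/':
--             return False
--         if ch == ':':
--             if not rev:
--                 return False
--             suffix = ''.join(reversed(rev))
--             return suffix in ('raw', 'conflicts') or has_digit
--         rev.append(ch)
--         has_digit = has_digit or ch.isdigit()
--     return False
-- ===== Notes on version B (the rewrite author's own statement) =====
-- stated objective: alternative
-- what changed: Replaces A's rsplit/rfind/slice pipeline (which materialises the tail and suffix and then re-scans the suffix with any(isdigit)) by a single reverse scan of the path that stops at the first slash or colon seen from the end, accumulating the digit flag on the way.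
import Mathlib
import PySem

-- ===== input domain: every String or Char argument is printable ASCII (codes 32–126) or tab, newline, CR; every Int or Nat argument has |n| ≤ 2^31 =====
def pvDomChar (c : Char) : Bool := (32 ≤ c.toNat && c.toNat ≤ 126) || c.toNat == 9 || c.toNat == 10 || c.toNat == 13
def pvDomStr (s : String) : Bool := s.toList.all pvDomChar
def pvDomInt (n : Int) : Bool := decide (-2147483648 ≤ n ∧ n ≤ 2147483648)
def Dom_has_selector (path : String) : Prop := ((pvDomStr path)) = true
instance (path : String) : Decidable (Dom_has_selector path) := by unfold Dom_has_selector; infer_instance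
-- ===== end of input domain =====

-- B replaces A's rsplit/rfind/slice pipeline by one reverse scan stopping at the first slash or colon from the end (alternative decomposition, same cost).

-- ===== PORT A =====
-- A's body on the code points; has_selector applies it to path.toList.
def hasSelA (s : List Char) : Bool :=
  if s = [] then false                                   -- if not path
  else
    -- path.rsplit("/", 1)[-1]: ported by hand as the characters after the LAST '/'
    -- (exact: with maxsplit=1 the last piece is everything after the last separator,
    --  and rfind = -1 gives slice-from-0 = the whole string when '/' is absent)
    let tail := PySem.Chars.slice s (some (PySem.Chars.rfind s ['/'] + 1)) none
    let idx := PySem.Chars.rfind tail [':']              -- tail.rfind(":")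
    if idx < 0 then false
    else
      let suffix := PySem.Chars.slice tail (some (idx + 1)) none   -- tail[idx+1:]
      if suffix = [] then false                          -- if not suffix
      else if suffix = "raw".toList ∨ suffix = "conflicts".toList then true
      else suffix.any PySem.Chars.isdigit                -- any(ch.isdigit() for ch in suffix)

def has_selector (path : String) : Bool := hasSelA path.toList

-- ===== PORT B =====
-- B's loop: scan the reversed characters, collecting `rev` (Python list.append) and the digit flag.
def hasSelAltGo : List Char → List Char → Bool → Bool
  | [], _, _ => false
  | c :: rest, rev, hasDigit =>
    if c = '/' then false
    else if c = ':' then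
      if rev = [] then false
      else
        let suffix := rev.reverse                        -- ''.join(reversed(rev))
        if suffix = "raw".toList ∨ suffix = "conflicts".toList then true else hasDigit
    else hasSelAltGo rest (rev ++ [c]) (hasDigit || PySem.Chars.isdigit c)

def has_selector_alt (path : String) : Bool := hasSelAltGo path.toList.reverse [] false

-- ===== PRECONDITION & SPEC =====
def Spec_has_selector (path : String) (out : Bool) : Prop := out = has_selector_alt path
instance (path : String) (out : Bool) : Decidable (Spec_has_selector path out) := by unfold Spec_has_selector; infer_instance

-- ===== CLAIM (what is proved, stated in full; the proofs are below) =====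
def Claim_equal_has_selector : Prop := ∀ (path : String), Dom_has_selector path → Spec_has_selector path (has_selector path)

-- ===== LEMMAS AND PROOFS =====

-- [c] is a prefix exactly when the head is c
theorem singleton_prefix_iff (c : Char) (l : List Char) :
    [c] <+: l ↔ l.head? = some c := by
  cases l with
  | nil => simp
  | cons x t => simp [eq_comm]

-- [c].isPrefixOf (s.drop k) checks s[k]
theorem isPrefixOf_drop_iff (c : Char) (s : List Char) (k : Nat) :
    [c].isPrefixOf (s.drop k) = true ↔ s[k]? = some c := by
  rw [List.isPrefixOf_iff_prefix, singleton_prefix_iff, List.head?_drop]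

-- rfind.go returns -1 when no position ≤ j carries c
theorem rfind_go_neg (s : List Char) (c : Char) (j : Nat)
    (h : ∀ k, k ≤ j → s[k]? ≠ some c) :
    PySem.Chars.rfind.go s [c] j = -1 := by
  induction j with
  | zero =>
    have h0 : ¬ ([c].isPrefixOf (s.drop 0) = true) := by
      rw [isPrefixOf_drop_iff]; exact h 0 (le_refl 0)
    simp only [List.drop_zero] at h0
    simp only [PySem.Chars.rfind.go]
    rw [if_neg h0]
  | succ j ih =>
    have h1 : ¬ ([c].isPrefixOf (s.drop (j+1)) = true) := by
      rw [isPrefixOf_drop_iff]; exact h (j+1) (le_refl _)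
    simp only [PySem.Chars.rfind.go]
    rw [if_neg h1]
    exact ih (fun k hk => h k (Nat.le_succ_of_le hk))

-- rfind.go returns the highest i ≤ j with s[i] = c
theorem rfind_go_eq (s : List Char) (c : Char) (j i : Nat)
    (hij : i ≤ j) (hi : s[i]? = some c)
    (hmax : ∀ k, i < k → k ≤ j → s[k]? ≠ some c) :
    PySem.Chars.rfind.go s [c] j = (i : Int) := by
  induction j with
  | zero =>
    have hi0 : i = 0 := Nat.le_zero.mp hij
    subst hi0
    have hp : [c].isPrefixOf (s.drop 0) = true := by rw [isPrefixOf_drop_iff]; exact hi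
    simp only [List.drop_zero] at hp
    simp only [PySem.Chars.rfind.go]
    rw [if_pos hp]
    rfl
  | succ j ih =>
    by_cases hij' : i = j + 1
    · subst hij'
      have hp : [c].isPrefixOf (s.drop (j+1)) = true := by rw [isPrefixOf_drop_iff]; exact hi
      simp only [PySem.Chars.rfind.go]
      rw [if_pos hp]
    · have hij2 : i ≤ j := Nat.lt_succ_iff.mp (lt_of_le_of_ne hij hij')
      have hp : ¬ ([c].isPrefixOf (s.drop (j+1)) = true) := by
        rw [isPrefixOf_drop_iff]
        exact hmax (j+1) (Nat.lt_succ_of_le hij2) (le_refl _)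
      simp only [PySem.Chars.rfind.go]
      rw [if_neg hp]
      exact ih hij2 (fun k h1 h2 => hmax k h1 (Nat.le_succ_of_le h2))

-- c absent → rfind = -1
theorem rfind_single_not_mem (ys : List Char) (c : Char) (h : c ∉ ys) :
    PySem.Chars.rfind ys [c] = -1 := by
  unfold PySem.Chars.rfind
  apply rfind_go_neg
  intro k _ hk
  exact h (List.mem_of_getElem? hk)

-- c absent from ys → the last c of xs ++ c :: ys is at index xs.length
theorem rfind_single_last (xs ys : List Char) (c : Char) (h : c ∉ ys) :
    PySem.Chars.rfind (xs ++ c :: ys) [c] = (xs.length : Int) := by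
  unfold PySem.Chars.rfind
  apply rfind_go_eq
  · simp
  · rw [List.getElem?_append_right (le_refl _)]
    simp
  · intro k h1 h2 hk
    rw [List.getElem?_append_right (le_of_lt h1)] at hk
    have hk' : (c :: ys)[k - xs.length]? = some c := hk
    rcases Nat.exists_eq_add_of_lt h1 with ⟨m, hm⟩
    have hm1 : k - xs.length = m + 1 := by omega
    rw [hm1] at hk'
    simp only [List.getElem?_cons_succ] at hk'
    exact h (List.mem_of_getElem? hk')

-- c absent from ys → rfind (xs ++ ys) points below xs.length (an index into xs, or -1)
theorem rfind_single_lt (xs ys : List Char) (c : Char) (h : c ∉ ys) :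
    -1 ≤ PySem.Chars.rfind (xs ++ ys) [c] ∧
    PySem.Chars.rfind (xs ++ ys) [c] < (xs.length : Int) := by
  have key : ∀ j : Nat, PySem.Chars.rfind.go (xs ++ ys) [c] j = -1 ∨
      ∃ i : Nat, i ≤ j ∧ PySem.Chars.rfind.go (xs ++ ys) [c] j = (i : Int) ∧ (xs ++ ys)[i]? = some c := by
    intro j
    induction j with
    | zero =>
      by_cases hp : [c].isPrefixOf ((xs ++ ys)) = true
      · right
        refine ⟨0, le_refl _, ?_, ?_⟩
        · simp only [PySem.Chars.rfind.go]; rw [if_pos hp]; rfl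
        · have := (isPrefixOf_drop_iff c (xs ++ ys) 0)
          simp only [List.drop_zero] at this
          exact this.mp hp
      · left; simp only [PySem.Chars.rfind.go]; rw [if_neg hp]
    | succ j ih =>
      by_cases hp : [c].isPrefixOf ((xs ++ ys).drop (j+1)) = true
      · right
        refine ⟨j+1, le_refl _, ?_, (isPrefixOf_drop_iff c (xs ++ ys) (j+1)).mp hp⟩
        simp only [PySem.Chars.rfind.go]; rw [if_pos hp]
      · have heq : PySem.Chars.rfind.go (xs ++ ys) [c] (j+1) = PySem.Chars.rfind.go (xs ++ ys) [c] j := by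
          simp only [PySem.Chars.rfind.go]; rw [if_neg hp]
        rcases ih with h1 | ⟨i, h1, h2, h3⟩
        · left; rw [heq, h1]
        · right; exact ⟨i, Nat.le_succ_of_le h1, by rw [heq, h2], h3⟩
  rcases key (xs ++ ys).length with h1 | ⟨i, _, h2, h3⟩
  · unfold PySem.Chars.rfind; rw [h1]
    constructor
    · omega
    · have : (0:Int) ≤ xs.length := Int.natCast_nonneg _
      omega
  · unfold PySem.Chars.rfind; rw [h2]
    have hlt : i < xs.length := by
      by_contra hge
      rw [List.getElem?_append_right (Nat.le_of_not_lt hge)] at h3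
      exact h (List.mem_of_getElem? h3)
    constructor
    · omega
    · exact_mod_cast hlt

-- main invariant: scanning r with accumulator rev (no '/' or ':' in it) computes A on r.reverse ++ rev.reverse
theorem main_inv (r : List Char) : ∀ (rev : List Char) (hd : Bool),
    '/' ∉ rev → ':' ∉ rev → hd = rev.any PySem.Chars.isdigit →
    hasSelAltGo r rev hd = hasSelA (r.reverse ++ rev.reverse) := by
  induction r with
  | nil =>
    intro rev hd h1 h2 hhd
    simp only [hasSelAltGo, List.reverse_nil, List.nil_append]
    by_cases hrev : rev.reverse = []
    · simp [hasSelA, hrev]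
    · have hfind : PySem.Chars.rfind rev.reverse ['/'] = -1 :=
        rfind_single_not_mem _ _ (by simp [h1])
      have hfind2 : PySem.Chars.rfind rev.reverse [':'] = -1 :=
        rfind_single_not_mem _ _ (by simp [h2])
      simp only [hasSelA, if_neg hrev, hfind]
      rw [show ((-1 : Int) + 1) = ((0 : Nat) : Int) by norm_num]
      simp only [PySem.Chars.slice_eq_listSlice, PySem.List.slice_from_natCast, List.drop_zero]
      rw [hfind2]
      norm_num
  | cons c rest ih =>
    intro rev hd h1 h2 hhd
    simp only [hasSelAltGo]
    by_cases hc1 : c = '/'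
    · subst hc1
      rw [if_pos rfl]
      have hmem : '/' ∉ rev.reverse := by simp [h1]
      have hfind : PySem.Chars.rfind (rest.reverse ++ '/' :: rev.reverse) ['/']
          = (rest.reverse.length : Int) := rfind_single_last _ _ _ hmem
      have hne : rest.reverse ++ '/' :: rev.reverse ≠ [] := by simp
      simp only [List.reverse_cons, List.append_assoc, List.singleton_append]
      simp only [hasSelA, if_neg hne, hfind]
      rw [show ((rest.reverse.length : Int) + 1) = ((rest.reverse.length + 1 : Nat) : Int) by push_cast; ring]
      simp only [PySem.Chars.slice_eq_listSlice, PySem.List.slice_from_natCast]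
      rw [List.drop_append]
      simp only [List.drop_of_length_le (by omega : rest.reverse.length ≤ rest.reverse.length + 1),
        List.nil_append, show rest.reverse.length + 1 - rest.reverse.length = 1 by omega,
        List.drop_one, List.tail_cons]
      rw [rfind_single_not_mem _ _ (by simp [h2])]
      norm_num
    · rw [if_neg hc1]
      by_cases hc2 : c = ':'
      · subst hc2
        rw [if_pos rfl]
        have hmemS : ':' ∉ rev.reverse := by simp [h2]
        have hmemC : '/' ∉ ':' :: rev.reverse := by simp [h1]
        -- m = rfind of '/' over the whole string: an index into rest.reverse, or -1
        obtain ⟨hm1, hm2⟩ := rfind_single_lt rest.reverse (':' :: rev.reverse) '/' hmemC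
        set m := PySem.Chars.rfind (rest.reverse ++ ':' :: rev.reverse) ['/'] with hmdef
        have hne : rest.reverse ++ ':' :: rev.reverse ≠ [] := by simp
        simp only [List.reverse_cons, List.append_assoc, List.singleton_append]
        simp only [hasSelA, if_neg hne, ← hmdef]
        -- tail = rest.reverse.drop (m+1).toNat ++ ':' :: rev.reverse
        have htail : PySem.List.slice (rest.reverse ++ ':' :: rev.reverse) (some (m + 1)) none
            = rest.reverse.drop (m+1).toNat ++ ':' :: rev.reverse := by
          rw [PySem.List.slice_from _ (show (0:Int) ≤ m + 1 by omega)]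
          rw [List.drop_append]
          have : (m+1).toNat - rest.reverse.length = 0 := by omega
          rw [this, List.drop_zero]
        simp only [PySem.Chars.slice_eq_listSlice, htail]
        set l' := rest.reverse.drop (m+1).toNat with hl'
        have hidx : PySem.Chars.rfind (l' ++ ':' :: rev.reverse) [':'] = (l'.length : Int) :=
          rfind_single_last _ _ _ hmemS
        rw [hidx]
        have hidxneg : ¬ ((l'.length : Int) < 0) := by
          have := Int.natCast_nonneg l'.length; omega
        rw [if_neg hidxneg]
        have hsuf : PySem.List.slice (l' ++ ':' :: rev.reverse) (some ((l'.length : Int) + 1)) none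
            = rev.reverse := by
          rw [show ((l'.length : Int) + 1) = ((l'.length + 1 : Nat) : Int) by push_cast; ring]
          rw [PySem.List.slice_from_natCast]
          rw [List.drop_append]
          simp only [List.drop_of_length_le (by omega : l'.length ≤ l'.length + 1),
            List.nil_append, show l'.length + 1 - l'.length = 1 by omega,
            List.drop_one, List.tail_cons]
        rw [hsuf]
        by_cases hrev : rev = []
        · simp [hrev]
        · have hrevr : rev.reverse ≠ [] := by simp [hrev]
          rw [if_neg hrev, if_neg hrevr]
          by_cases hmemRC : rev.reverse = "raw".toList ∨ rev.reverse = "conflicts".toList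
          · rw [if_pos hmemRC, if_pos hmemRC]
          · rw [if_neg hmemRC, if_neg hmemRC]
            rw [hhd, List.any_reverse]
      · rw [if_neg hc2]
        rw [ih (rev ++ [c]) _ (by simp; exact ⟨h1, fun h => hc1 h.symm⟩)
              (by simp; exact ⟨h2, fun h => hc2 h.symm⟩)
              (by simp [hhd, Bool.or_comm])]
        congr 1
        simp

-- ===== VERDICT (by name: the statement is the Claim_ definition above) =====
theorem has_selector_spec : Claim_equal_has_selector := by
  intro path _
  unfold Spec_has_selector has_selector has_selector_alt
  rw [main_inv path.toList.reverse [] false (by simp) (by simp) (by simp)]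
  simp
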